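-- pv_equiv track=rewrite | github.com/rcruz63/Adviento2023 | adv2023/dia9/dia9.py | add_elements_start
-- ===== SOURCE A (Python) =====
-- from typing import List
--
-- def add_elements_start(lists: List[List[int]]) -> List[int]:
--     lists = lists[::-1]
--     carry = 0
--     for lst in lists:
--         carry = lst[0] - carry
--         lst.insert(0, carry)
--     lists = lists[::-1]
--     # print ("Nuevas seceuncias: ", lists)
--     return lists[0][0]
-- ===== SOURCE B (Python) =====
-- from typing import List
--
-- def add_elements_start(lists: List[List[int]]) -> List[int]:
--     total = 0
--     sign = 1
--     for lst in lists:
--         total += sign * lst[0]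
--         sign = -sign
--     return total
-- ===== Notes on version B (the rewrite author's own statement) =====
-- stated objective: simpler
-- what changed: Replaces the reverse-copy / insert(0,.)-into-every-sublist / reverse-again pass with a single forward pass that reads only lst[0] and flips a sign, with no list mutation or copying.
import Mathlib
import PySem

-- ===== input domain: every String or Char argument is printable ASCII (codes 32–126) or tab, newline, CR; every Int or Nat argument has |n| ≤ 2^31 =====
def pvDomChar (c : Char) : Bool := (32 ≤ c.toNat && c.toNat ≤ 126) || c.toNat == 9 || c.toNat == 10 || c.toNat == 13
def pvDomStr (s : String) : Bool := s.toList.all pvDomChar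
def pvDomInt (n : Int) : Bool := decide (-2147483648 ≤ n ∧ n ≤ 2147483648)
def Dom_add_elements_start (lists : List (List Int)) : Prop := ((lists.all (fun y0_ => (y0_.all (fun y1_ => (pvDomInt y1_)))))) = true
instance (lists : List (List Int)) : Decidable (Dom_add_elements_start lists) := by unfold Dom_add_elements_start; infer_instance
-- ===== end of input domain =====

-- B replaces A's reverse / insert(0,·) into every sublist / reverse-again pass by one forward
-- pass reading only lst[0] with a flipping sign; equivalence is about the RETURN value only
-- (Python A mutates each sublist in place, B does not).

-- ===== PORT A =====
-- one loop iteration: carry = lst[0] - carry; lst.insert(0, carry)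
def pvStepA (st : Int × List (List Int)) (lst : List Int) : Int × List (List Int) :=
  let c := (PySem.List.pyGet? lst 0).getD 0 - st.1
  (c, st.2 ++ [c :: lst])

def add_elements_start (lists : List (List Int)) : Int :=
  let rev := lists.reverse                                   -- lists = lists[::-1]
  let res := rev.foldl pvStepA (0, [])                       -- the loop (carry, mutated lists)
  let fin := res.2.reverse                                   -- lists = lists[::-1]
  ((PySem.List.pyGet? fin 0).bind (fun l => PySem.List.pyGet? l 0)).getD 0   -- lists[0][0]

-- ===== PORT B =====
def pvStepB (st : Int × Int) (lst : List Int) : Int × Int :=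
  (st.1 + st.2 * (PySem.List.pyGet? lst 0).getD 0, -st.2)

def add_elements_start_alt (lists : List (List Int)) : Int :=
  (lists.foldl pvStepB (0, 1)).1

-- ===== PRECONDITION & SPEC =====
-- Pre_ excludes exactly the inputs where Python A raises IndexError: empty outer list
-- (lists[0]) or an empty sublist (lst[0]).
def Pre_add_elements_start (lists : List (List Int)) : Prop :=
  lists ≠ [] ∧ ∀ l ∈ lists, l ≠ []
instance (lists : List (List Int)) : Decidable (Pre_add_elements_start lists) := by
  unfold Pre_add_elements_start; infer_instance

def pvWitness_add_elements_start : List (List Int) := [[5, 9], [2, 3]]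

def Spec_add_elements_start (lists : List (List Int)) (out : Int) : Prop := out = add_elements_start_alt lists
instance (lists : List (List Int)) (out : Int) : Decidable (Spec_add_elements_start lists out) := by unfold Spec_add_elements_start; infer_instance

-- ===== CLAIM (what is proved, stated in full; the proofs are below) =====
def Claim_equal_add_elements_start : Prop := ∀ (lists : List (List Int)), Dom_add_elements_start lists → Pre_add_elements_start lists → Spec_add_elements_start lists (add_elements_start lists)

-- ===== LEMMAS AND PROOFS =====

-- the alternating sum of heads both programs compute
def pvAlt : List (List Int) → Int
  | [] => 0
  | x :: xs => (PySem.List.pyGet? x 0).getD 0 - pvAlt xs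

theorem pvStepA_fst_indep (r : List (List Int)) (c : Int) (a b : List (List Int)) :
    (r.foldl pvStepA (c, a)).1 = (r.foldl pvStepA (c, b)).1 := by
  induction r generalizing c a b with
  | nil => rfl
  | cons x xs ih => simp [pvStepA]; exact ih _ _ _

theorem pvCarry_rev (xs : List (List Int)) (a : List (List Int)) :
    (xs.reverse.foldl pvStepA (0, a)).1 = pvAlt xs := by
  induction xs generalizing a with
  | nil => rfl
  | cons x xs ih =>
    simp only [List.reverse_cons, List.foldl_append, List.foldl_cons, List.foldl_nil, pvStepA,
      pvAlt]
    rw [pvStepA_fst_indep _ _ _ a, ih]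

theorem pvA_eq (lists : List (List Int)) : add_elements_start lists = pvAlt lists := by
  cases lists with
  | nil => rfl
  | cons x xs =>
    simp only [add_elements_start, List.reverse_cons, List.foldl_append, List.foldl_cons,
      List.foldl_nil, pvStepA, pvAlt, List.reverse_append, List.reverse_nil, List.nil_append,
      List.singleton_append, PySem.List.pyGet?_zero_cons, Option.bind_some, Option.getD_some]
    rw [pvCarry_rev]

theorem pvB_eq (lists : List (List Int)) (t s : Int) :
    (lists.foldl pvStepB (t, s)).1 = t + s * pvAlt lists := by
  induction lists generalizing t s with
  | nil => simp [pvAlt]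
  | cons x xs ih => simp only [List.foldl_cons, pvStepB, pvAlt, ih]; ring

-- ===== VERDICT (by name: the statement is the Claim_ definition above) =====
theorem add_elements_start_spec : Claim_equal_add_elements_start := by
  intro lists _ _
  unfold Spec_add_elements_start add_elements_start_alt
  rw [pvB_eq, pvA_eq]; ring
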